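-- pv_equiv track=rewrite | github.com/szufix/mapel | mapel-roommates/src/mapel/roommates/cultures/mallows.py | calculateZpoly
-- ===== SOURCE A (Python) =====
-- def calculateZpoly(m):
--     res = [1]
--     for i in range(1, m + 1):
--         mult = [1] * i
--         res2 = [0] * (len(res) + len(mult) - 1)
--         for o1, i1 in enumerate(res):
--             for o2, i2 in enumerate(mult):
--                 res2[o1 + o2] += i1 * i2
--         res = res2
--     return res
-- ===== SOURCE B (Python) =====
-- def calculateZpoly(m):
--     # sliding-window via prefix sums: multiplying by 1+x+...+x^(i-1) is a window sum
--     res = [1]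
--     for i in range(2, m + 1):
--         pref = [0]
--         for v in res:
--             pref.append(pref[-1] + v)
--         n = len(res) + i - 1
--         res = [pref[min(k + 1, n - i + 1)] - pref[max(k - i + 1, 0)] for k in range(n)]
--     return res
-- ===== Notes on version B (the rewrite author's own statement) =====
-- stated objective: faster
-- what changed: Replaces the nested all-ones convolution (inner loop over the i ones for every coefficient) by a prefix-sum array and a sliding-window difference per coefficient, dropping one loop level.
import Mathlib
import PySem

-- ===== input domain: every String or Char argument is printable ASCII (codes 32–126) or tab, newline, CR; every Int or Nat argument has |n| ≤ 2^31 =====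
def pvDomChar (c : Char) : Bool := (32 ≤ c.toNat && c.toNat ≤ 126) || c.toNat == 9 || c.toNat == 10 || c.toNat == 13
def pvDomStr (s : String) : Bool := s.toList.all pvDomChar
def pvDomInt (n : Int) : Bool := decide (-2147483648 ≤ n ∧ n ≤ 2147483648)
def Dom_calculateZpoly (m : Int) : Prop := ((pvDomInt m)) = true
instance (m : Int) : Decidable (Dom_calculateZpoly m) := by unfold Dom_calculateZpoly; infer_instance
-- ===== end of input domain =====

-- B replaces A's nested all-ones convolution with a prefix-sum sliding window per step (objective: faster).

-- ===== PORT A =====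
-- one pass of A's loop body: convolve res with mult = [1]*i by the nested enumerate loops
-- ([1]*i is List.replicate i.toNat 1, so len(res)+len(mult)-1 is res.length + i.toNat - 1)
def stepA (res : List Int) (i : Int) : List Int :=
  (PySem.List.enumerate res 0).foldl
    (fun r2 p =>
      (PySem.List.enumerate (List.replicate i.toNat (1 : Int)) 0).foldl
        (fun r2' q => PySem.List.pySetD r2' (p.1 + q.1)
          (PySem.List.pyGetD r2' (p.1 + q.1) 0 + p.2 * q.2)) r2)
    (List.replicate (res.length + i.toNat - 1) 0)

def calculateZpoly (m : Int) : List Int :=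
  (PySem.List.pyRange 1 (m + 1) 1).foldl stepA [1]

-- ===== PORT B =====
-- pref = [0]; for v in res: pref.append(pref[-1] + v)
def prefOf (res : List Int) : List Int :=
  res.foldl (fun p v => p ++ [PySem.List.pyGetD p (-1) 0 + v]) [0]

-- one pass of B's loop body: sliding-window sums via the prefix array (n = len(res)+i-1 is inlined)
def stepB (res : List Int) (i : Int) : List Int :=
  (PySem.List.pyRange 0 ((res.length : Int) + i - 1) 1).map (fun k =>
    PySem.List.pyGetD (prefOf res) (min (k + 1) ((res.length : Int) + i - 1 - i + 1)) 0
    - PySem.List.pyGetD (prefOf res) (max (k - i + 1) 0) 0)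

def calculateZpoly_alt (m : Int) : List Int :=
  (PySem.List.pyRange 2 (m + 1) 1).foldl stepB [1]

-- ===== PRECONDITION & SPEC =====
def Spec_calculateZpoly (m : Int) (out : List Int) : Prop := out = calculateZpoly_alt m
instance (m : Int) (out : List Int) : Decidable (Spec_calculateZpoly m out) := by unfold Spec_calculateZpoly; infer_instance

-- ===== CLAIM (what is proved, stated in full; the proofs are below) =====
def Claim_equal_calculateZpoly : Prop := ∀ (m : Int), Dom_calculateZpoly m → Spec_calculateZpoly m (calculateZpoly m)

-- ===== LEMMAS AND PROOFS =====

-- proof-only: the contribution of res (starting at offset `start`) to output position k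
def windowSum : List Int → Int → Int → Nat → Int
  | [], _, _, _ => 0
  | v :: vs, start, k, i =>
      (if start ≤ k ∧ k < start + i then v else 0) + windowSum vs (start + 1) k i

lemma getD_set_eq (l : List Int) (n k : Nat) (v d : Int) (h : n < l.length) :
    (l.set n v).getD k d = if k = n then v else l.getD k d := by
  unfold List.getD
  rw [List.getElem?_set]
  split_ifs with h1 h2 <;> first | rfl | omega

lemma getD_replicate_zero (n k : Nat) : (List.replicate n (0 : Int)).getD k 0 = 0 := by
  rcases lt_or_ge k n with h | h
  · rw [List.getD_replicate _ h]
  · rw [List.getD_eq_default]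
    simpa using h

-- A's inner loop adds v to positions o1+s .. o1+s+i-1 (all in range)
lemma innerChar (i : Nat) : ∀ (s o1 v : Int) (r2 : List Int),
    0 ≤ o1 + s → o1 + s + i ≤ (r2.length : Int) →
    ((PySem.List.enumerate (List.replicate i (1 : Int)) s).foldl
      (fun r2' q => PySem.List.pySetD r2' (o1 + q.1)
        (PySem.List.pyGetD r2' (o1 + q.1) 0 + v * q.2)) r2).length = r2.length ∧
    ∀ k : Nat, ((PySem.List.enumerate (List.replicate i (1 : Int)) s).foldl
      (fun r2' q => PySem.List.pySetD r2' (o1 + q.1)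
        (PySem.List.pyGetD r2' (o1 + q.1) 0 + v * q.2)) r2).getD k 0
      = r2.getD k 0 + (if o1 + s ≤ (k : Int) ∧ (k : Int) < o1 + s + i then v else 0) := by
  induction i with
  | zero =>
    intro s o1 v r2 h0 hf
    simp only [List.replicate, PySem.List.enumerate, List.foldl_nil]
    refine ⟨trivial, fun k => ?_⟩
    rw [if_neg (by omega)]
    omega
  | succ n ih =>
    intro s o1 v r2 h0 hf
    rw [List.replicate_succ, PySem.List.enumerate_cons, List.foldl_cons]
    have hin : 0 ≤ o1 + s ∧ o1 + s < (r2.length : Int) := by push_cast at hf; omega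
    have hset : PySem.List.pySetD r2 (o1 + s) (PySem.List.pyGetD r2 (o1 + s) 0 + v * 1)
        = r2.set (o1 + s).toNat (r2[(o1 + s).toNat]'(by omega) + v) := by
      rw [PySem.List.pySetD_of_nonneg _ _ hin.1,
          PySem.List.pyGetD_eq_getElem _ _ hin.1 hin.2, mul_one]
    rw [hset]
    obtain ⟨hl, hg⟩ := ih (s + 1) o1 v (r2.set (o1 + s).toNat (r2[(o1 + s).toNat]'(by omega) + v))
      (by omega) (by rw [List.length_set]; push_cast at hf ⊢; omega)
    refine ⟨by rw [hl, List.length_set], fun k => ?_⟩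
    rw [hg k, getD_set_eq _ _ _ _ _ (by omega)]
    by_cases hk : k = (o1 + s).toNat
    · subst hk
      rw [if_pos rfl, if_neg (by omega), if_pos (by push_cast; omega)]
      rw [List.getD_eq_getElem _ _ (by omega)]
      ring
    · rw [if_neg hk]
      have hiff : (o1 + (s + 1) ≤ (k : Int) ∧ (k : Int) < o1 + (s + 1) + n)
          ↔ (o1 + s ≤ (k : Int) ∧ (k : Int) < o1 + s + (n + 1 : Nat)) := by
        push_cast
        omega
      rw [if_congr hiff rfl rfl]

-- A's double loop adds, at each position k, the window sum of res over [k-i+1, k]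
lemma outerChar (res : List Int) : ∀ (start : Int) (r2 : List Int) (i : Nat),
    0 ≤ start → start + res.length + i ≤ (r2.length : Int) + 1 →
    ((PySem.List.enumerate res start).foldl
      (fun r2 p =>
        (PySem.List.enumerate (List.replicate i (1 : Int)) 0).foldl
          (fun r2' q => PySem.List.pySetD r2' (p.1 + q.1)
            (PySem.List.pyGetD r2' (p.1 + q.1) 0 + p.2 * q.2)) r2) r2).length = r2.length ∧
    ∀ k : Nat, ((PySem.List.enumerate res start).foldl
      (fun r2 p =>
        (PySem.List.enumerate (List.replicate i (1 : Int)) 0).foldl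
          (fun r2' q => PySem.List.pySetD r2' (p.1 + q.1)
            (PySem.List.pyGetD r2' (p.1 + q.1) 0 + p.2 * q.2)) r2) r2).getD k 0
      = r2.getD k 0 + windowSum res start (k : Int) i := by
  induction res with
  | nil =>
    intro start r2 i h0 hf
    simp [PySem.List.enumerate, windowSum]
  | cons v vs ih =>
    intro start r2 i h0 hf
    rw [PySem.List.enumerate_cons, List.foldl_cons]
    simp only [List.length_cons] at hf
    obtain ⟨hl1, hg1⟩ := innerChar i 0 start v r2 (by omega)
      (by push_cast at hf ⊢; omega)
    obtain ⟨hl2, hg2⟩ := ih (start + 1)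
      ((PySem.List.enumerate (List.replicate i (1 : Int)) 0).foldl
        (fun r2' q => PySem.List.pySetD r2' (start + q.1)
          (PySem.List.pyGetD r2' (start + q.1) 0 + v * q.2)) r2) i
      (by omega) (by rw [hl1]; push_cast at hf ⊢; omega)
    refine ⟨by rw [hl2, hl1], fun k => ?_⟩
    rw [hg2 k, hg1 k, windowSum]
    have : (start + 0 ≤ (k : Int) ∧ (k : Int) < start + 0 + i)
        ↔ (start ≤ (k : Int) ∧ (k : Int) < start + i) := by omega
    rw [if_congr this rfl rfl]
    ring

-- the window sum is a difference of two prefix sums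
lemma windowSumEq (res : List Int) : ∀ (start k : Int) (i : Nat),
    windowSum res start k i
      = (res.take ((k - start + 1).toNat)).sum - (res.take ((k - start - i + 1).toNat)).sum := by
  induction res with
  | nil => intro start k i; simp [windowSum]
  | cons v vs ih =>
    intro start k i
    rw [windowSum, ih (start + 1) k i]
    by_cases hA : k < start
    · rw [if_neg (by omega)]
      rw [show (k - start + 1).toNat = 0 from by omega,
          show (k - start - i + 1).toNat = 0 from by omega,
          show (k - (start + 1) + 1).toNat = 0 from by omega,
          show (k - (start + 1) - i + 1).toNat = 0 from by omega]
      simp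
    · by_cases hB : k < start + i
      · rw [if_pos (by omega)]
        rw [show (k - start + 1).toNat = (k - (start + 1) + 1).toNat + 1 from by omega,
            show (k - start - i + 1).toNat = 0 from by omega,
            show (k - (start + 1) - i + 1).toNat = 0 from by omega,
            List.take_succ_cons]
        simp
      · rw [if_neg (by omega)]
        rw [show (k - start + 1).toNat = (k - (start + 1) + 1).toNat + 1 from by omega,
            show (k - start - i + 1).toNat = (k - (start + 1) - i + 1).toNat + 1 from by omega,
            List.take_succ_cons, List.take_succ_cons]
        simp

-- B's prefix array holds the prefix sums of res
lemma prefOf_eq (res : List Int) :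
    prefOf res = (List.range (res.length + 1)).map (fun j => (res.take j).sum) := by
  unfold prefOf
  induction res using List.reverseRecOn with
  | nil => simp
  | append_singleton xs x ih =>
    rw [List.foldl_append, ih, List.foldl_cons, List.foldl_nil]
    have hne : ((List.range (xs.length + 1)).map (fun j => (xs.take j).sum)) ≠ [] := by simp
    rw [PySem.List.pyGetD_neg_one _ _ hne]
    rw [List.getLast_eq_getElem]
    simp only [List.length_append, List.length_map, List.length_range, List.length_singleton]
    rw [List.getElem_map, List.getElem_range]
    conv_rhs => rw [List.range_succ, List.map_append]
    congr 1
    · apply List.map_congr_left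
      intro j hj
      rw [List.mem_range] at hj
      rw [List.take_append_of_le_length (by omega)]
    · simp only [List.map_singleton]
      congr 1
      rw [List.take_of_length_le (by simp), List.take_of_length_le (by simp), List.sum_append]
      simp

-- the heart of the equivalence: one convolution pass equals one sliding-window pass
lemma stepA_eq_stepB (res : List Int) (i : Int) (hi : 1 ≤ i) : stepA res i = stepB res i := by
  have hiN : 1 ≤ i.toNat := by omega
  obtain ⟨hlen, hget⟩ := outerChar res 0 (List.replicate (res.length + i.toNat - 1) 0) i.toNat
    (le_refl 0) (by simp only [List.length_replicate]; omega)
  unfold stepA stepB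
  have hBlen : ((PySem.List.pyRange 0 ((res.length : Int) + i - 1) 1).map (fun k =>
      PySem.List.pyGetD (prefOf res) (min (k + 1) ((res.length : Int) + i - 1 - i + 1)) 0
      - PySem.List.pyGetD (prefOf res) (max (k - i + 1) 0) 0)).length
      = ((res.length : Int) + i - 1).toNat := by
    rw [List.length_map, PySem.List.length_pyRange_one]
    omega
  apply List.ext_getElem
  · rw [hlen, List.length_replicate, hBlen]
    omega
  · intro k h1 h2
    rw [hlen, List.length_replicate] at h1
    rw [← List.getD_eq_getElem _ 0 (by rw [hlen, List.length_replicate]; omega), hget k,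
        getD_replicate_zero, zero_add, windowSumEq res 0 (k : Int) i.toNat]
    rw [List.getElem_map, PySem.List.getElem_pyRange_one]
    have hL : ((res.length : Int) + i - 1 - i + 1) = (res.length : Int) := by ring
    rw [hL, prefOf_eq]
    have hplen : ((List.range (res.length + 1)).map (fun j => (res.take j).sum)).length
        = res.length + 1 := by simp
    rw [PySem.List.pyGetD_eq_getElem _ _ (by omega) (by rw [hplen]; push_cast; omega),
        PySem.List.pyGetD_eq_getElem _ _ (by omega) (by rw [hplen]; push_cast; omega),
        List.getElem_map, List.getElem_map, List.getElem_range, List.getElem_range]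
    have e2 : (max (0 + (k : Int) - i + 1) 0).toNat = ((k : Int) - 0 - (i.toNat : Int) + 1).toNat := by
      omega
    have e1 : res.take ((min (0 + (k : Int) + 1) (res.length : Int)).toNat)
        = res.take (((k : Int) - 0 + 1).toNat) := by
      by_cases hkL : (k : Int) + 1 ≤ (res.length : Int)
      · congr 1
        omega
      · rw [List.take_of_length_le (by omega), List.take_of_length_le (by omega)]
    rw [e1, e2]

lemma key (m : Int) : calculateZpoly m = calculateZpoly_alt m := by
  unfold calculateZpoly calculateZpoly_alt
  rcases lt_or_ge 0 m with h | h
  case inr =>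
    rw [PySem.List.pyRange_one_eq_nil (by omega), PySem.List.pyRange_one_eq_nil (by omega)]
    rfl
  case inl =>
    rw [PySem.List.pyRange_one_cons (by omega : (1 : Int) < m + 1), List.foldl_cons]
    have h1 : stepA [1] 1 = [1] := by decide
    rw [h1]
    exact PySem.List.foldl_congr_mem _ _ _ _ (fun acc x hx =>
      stepA_eq_stepB acc x (by have := (PySem.List.mem_pyRange_one).1 hx; omega))

-- ===== VERDICT (by name: the statement is the Claim_ definition above) =====
theorem calculateZpoly_spec : Claim_equal_calculateZpoly := by
  intro m _
  unfold Spec_calculateZpoly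
  exact key m
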